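-- pv_equiv track=rewrite | github.com/BntuHater/PythonHomework | task 3.1/strings.py | chars_in_at_least_two_strings
-- ===== SOURCE A (Python) =====
-- import string as s
--
-- def chars_in_at_least_two_strings(strings:[str]):
--     result = []
--     for letter in s.ascii_lowercase:
--         count = 0
--         for string in strings:
--             if letter in string:
--                 count += 1
--                 if count >= 2:
--                     if letter in result:
--                         break
--                     result.append(letter)
--     return result
-- ===== SOURCE B (Python) =====
-- import string as s
--
-- def chars_in_at_least_two_strings(strings):
--     # count, for each character, in how many of the strings it occurs, then filter a-z
--     counts = {}
--     for st in strings: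
--         for c in set(st):
--             counts[c] = counts.get(c, 0) + 1
--     return [c for c in s.ascii_lowercase if counts.get(c, 0) >= 2]
-- ===== Notes on version B (the rewrite author's own statement) =====
-- stated objective: alternative
-- what changed: Replaces the 26 per-letter scans over all strings (each doing a substring search per string) with a single pass that builds a per-character occurrence counter dict, then filters ascii_lowercase by count >= 2.
import Mathlib
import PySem

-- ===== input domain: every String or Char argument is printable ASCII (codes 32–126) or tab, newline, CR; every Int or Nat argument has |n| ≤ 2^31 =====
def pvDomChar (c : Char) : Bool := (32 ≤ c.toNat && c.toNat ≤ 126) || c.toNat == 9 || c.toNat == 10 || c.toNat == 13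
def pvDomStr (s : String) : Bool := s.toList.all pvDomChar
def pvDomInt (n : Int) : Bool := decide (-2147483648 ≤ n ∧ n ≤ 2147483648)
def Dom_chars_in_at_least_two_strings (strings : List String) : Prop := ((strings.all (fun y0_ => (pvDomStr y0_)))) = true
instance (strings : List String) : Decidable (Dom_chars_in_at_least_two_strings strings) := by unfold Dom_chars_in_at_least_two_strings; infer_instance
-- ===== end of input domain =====

-- B replaces A's 26 per-letter scans over all strings by one pass building a per-character
-- occurrence counter dict, then filters ascii_lowercase by count >= 2 (objective: alternative).

-- ===== PORT A =====
-- s.ascii_lowercase, iterated as characters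
def pvLowercase : List Char :=
  ['a','b','c','d','e','f','g','h','i','j','k','l','m',
   'n','o','p','q','r','s','t','u','v','w','x','y','z']

-- the inner 'for string in strings' loop of A, with its count and break
def pvInnerA (letter : Char) (result : List String) :
    List String → Int → List String
  | [], _ => result
  | st :: rest, count =>
    if PySem.Chars.isIn [letter] st.toList then
      let count' := count + 1
      if 2 ≤ count' then
        if result.contains (String.ofList [letter]) then result  -- break
        else pvInnerA letter (result ++ [String.ofList [letter]]) rest count'
      else pvInnerA letter result rest count'
    else pvInnerA letter result rest count

def chars_in_at_least_two_strings (strings : List String) : List String :=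
  pvLowercase.foldl (fun result letter => pvInnerA letter result strings 0) []

-- ===== PORT B =====
-- s.ascii_lowercase again, for B's final comprehension
def pvLowercaseB : List Char :=
  ['a','b','c','d','e','f','g','h','i','j','k','l','m',
   'n','o','p','q','r','s','t','u','v','w','x','y','z']

def chars_in_at_least_two_strings_alt (strings : List String) : List String :=
  let counts : PySem.Dict Char Int :=
    strings.foldl
      (fun d st =>
        (PySem.Set.ofList st.toList).foldl
          (fun d c => d.insert c (d.getD c 0 + 1)) d)
      PySem.Dict.empty
  (pvLowercaseB.filter (fun c => 2 ≤ counts.getD c 0)).map (fun c => String.ofList [c])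

-- ===== PRECONDITION & SPEC =====
def Spec_chars_in_at_least_two_strings (strings : List String) (out : List String) : Prop := out = chars_in_at_least_two_strings_alt strings
instance (strings : List String) (out : List String) : Decidable (Spec_chars_in_at_least_two_strings strings out) := by unfold Spec_chars_in_at_least_two_strings; infer_instance

-- ===== CLAIM (what is proved, stated in full; the proofs are below) =====
def Claim_equal_chars_in_at_least_two_strings : Prop := ∀ (strings : List String), Dom_chars_in_at_least_two_strings strings → Spec_chars_in_at_least_two_strings strings (chars_in_at_least_two_strings strings)

-- ===== LEMMAS AND PROOFS =====

-- the number of strings that contain c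
def pvCnt (c : Char) (strings : List String) : Nat :=
  strings.countP (fun st => decide (c ∈ st.toList))

-- B side: one string's inner counter fold bumps exactly the characters of that string
lemma pvCounts_one (cs : List Char) (hnd : cs.Nodup) (d : PySem.Dict Char Int) (x : Char) :
    (cs.foldl (fun d c => d.insert c (d.getD c 0 + 1)) d).getD x 0
      = d.getD x 0 + (if x ∈ cs then 1 else 0) := by
  induction cs generalizing d with
  | nil => simp
  | cons c t ih =>
    simp only [List.foldl_cons]
    rw [ih (List.Nodup.of_cons hnd)]
    by_cases hx : x = c
    · subst hx
      have hxt : x ∉ t := (List.nodup_cons.mp hnd).1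
      simp [pysem, hxt]
    · simp [pysem, hx]

lemma pvCounts_getD (strings : List String) (d : PySem.Dict Char Int) (x : Char) :
    (strings.foldl
      (fun d st => (PySem.Set.ofList st.toList).foldl
        (fun d c => d.insert c (d.getD c 0 + 1)) d) d).getD x 0
      = d.getD x 0 + (pvCnt x strings : Int) := by
  induction strings generalizing d with
  | nil => simp [pvCnt]
  | cons st rest ih =>
    simp only [List.foldl_cons]
    rw [ih, pvCounts_one _ (PySem.Set.nodup_ofList st.toList) d x]
    have hmem : x ∈ PySem.Set.ofList st.toList ↔ x ∈ st.toList :=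
      PySem.Set.mem_ofList st.toList x
    by_cases hx : x ∈ st.toList
    · simp [pvCnt, hmem, hx]; ring
    · simp [pvCnt, hmem, hx]

-- 'letter in string' for a one-character letter is character membership
lemma pvIsIn_single (c : Char) (l : List Char) :
    PySem.Chars.isIn [c] l = decide (c ∈ l) := by
  by_cases h : c ∈ l
  · simp only [h, decide_true]
    rw [PySem.Chars.isIn_iff_infix]
    exact (List.singleton_infix_iff c l).mpr h
  · simp only [h, decide_false]
    rw [PySem.Chars.isIn_eq_false_iff]
    exact fun hinf => h ((List.singleton_infix_iff c l).mp hinf)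

-- once the letter is in result and count ≥ 1, the inner loop returns result unchanged
lemma pvInnerA_mem (letter : Char) (result : List String)
    (hmem : String.ofList [letter] ∈ result) :
    ∀ (sts : List String) (k : Int), 1 ≤ k → pvInnerA letter result sts k = result := by
  intro sts
  induction sts with
  | nil => intro k _; rfl
  | cons st rest ih =>
    intro k hk
    simp only [pvInnerA]
    split
    · have : (2:Int) ≤ k + 1 := by omega
      simp only [this, if_pos, List.contains_eq_mem, hmem, decide_true]
    · exact ih k hk

-- the inner loop appends the letter iff at least (2 - k) of the strings contain it
lemma pvInnerA_eq (letter : Char) (sts : List String) :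
    ∀ (result : List String) (k : Int),
      String.ofList [letter] ∉ result → 0 ≤ k → k ≤ 1 →
      pvInnerA letter result sts k
        = if 2 ≤ k + (pvCnt letter sts : Int) then result ++ [String.ofList [letter]] else result := by
  induction sts with
  | nil =>
    intro result k _ _ hk1
    have h0 : (pvCnt letter [] : Int) = 0 := rfl
    rw [show pvInnerA letter result [] k = result from rfl, h0, if_neg (by omega)]
  | cons st rest ih =>
    intro result k hmem hk0 hk1
    simp only [pvInnerA]
    by_cases hin : letter ∈ st.toList
    · rw [if_pos (by simp [pvIsIn_single, hin])]
      by_cases h2 : (2:Int) ≤ k + 1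
      · rw [if_pos h2]
        rw [if_neg (by simpa [List.contains_eq_mem] using hmem)]
        rw [pvInnerA_mem letter _ (by simp) rest (k+1) (by omega)]
        have : 2 ≤ k + (pvCnt letter (st :: rest) : Int) := by
          simp only [pvCnt, List.countP_cons, hin, decide_true]; push_cast; omega
        rw [if_pos this]
      · rw [if_neg h2]
        rw [ih result (k+1) hmem (by omega) (by omega)]
        have : (k + 1 + (pvCnt letter rest : Int)) = k + (pvCnt letter (st :: rest) : Int) := by
          simp only [pvCnt, List.countP_cons, hin, decide_true]; push_cast; ring
        rw [this]
    · rw [if_neg (by simp [pvIsIn_single, hin])]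
      rw [ih result k hmem hk0 hk1]
      have : (pvCnt letter (st :: rest) : Int) = (pvCnt letter rest : Int) := by
        simp only [pvCnt, List.countP_cons, hin, decide_false]; push_cast; ring
      rw [this]

-- the outer loop over distinct letters is a filter
lemma pvOuter (strings : List String) :
    ∀ (L : List Char) (r0 : List String), L.Nodup →
      (∀ c ∈ L, String.ofList [c] ∉ r0) →
      L.foldl (fun result letter => pvInnerA letter result strings 0) r0
        = r0 ++ (L.filter (fun c => decide (2 ≤ (pvCnt c strings : Int)))).map (fun c => String.ofList [c]) := by
  intro L
  induction L with
  | nil => intro r0 _ _; simp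
  | cons c t ih =>
    intro r0 hnd hfresh
    simp only [List.foldl_cons]
    rw [pvInnerA_eq c strings r0 0 (hfresh c (by simp)) le_rfl zero_le_one]
    by_cases h2 : 2 ≤ (0 : Int) + (pvCnt c strings : Int)
    · rw [if_pos h2]
      rw [ih (r0 ++ [String.ofList [c]]) (List.Nodup.of_cons hnd)
            (by
              intro c' hc' hmem
              rcases List.mem_append.mp hmem with h | h
              · exact hfresh c' (by simp [hc']) h
              · have hmk : String.ofList [c'] = String.ofList [c] := List.mem_singleton.mp h
                have h3 := congrArg String.toList hmk
                rw [String.toList_ofList, String.toList_ofList] at h3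
                have : c' = c := by simpa using h3
                exact (List.nodup_cons.mp hnd).1 (this ▸ hc'))]
      have hn : 2 ≤ pvCnt c strings := by omega
      simp [hn]
    · rw [if_neg h2]
      rw [ih r0 (List.Nodup.of_cons hnd) (fun c' hc' => hfresh c' (by simp [hc']))]
      have hn : ¬ 2 ≤ pvCnt c strings := by omega
      simp [hn]

-- ===== VERDICT (by name: the statement is the Claim_ definition above) =====
theorem chars_in_at_least_two_strings_spec : Claim_equal_chars_in_at_least_two_strings := by
  intro strings _
  show chars_in_at_least_two_strings strings = chars_in_at_least_two_strings_alt strings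
  unfold chars_in_at_least_two_strings chars_in_at_least_two_strings_alt
  rw [pvOuter strings pvLowercase [] (by decide) (by simp)]
  rw [show pvLowercase = pvLowercaseB from rfl]
  simp only [List.nil_append]
  congr 1
  apply List.filter_congr
  intro c _
  rw [pvCounts_getD strings PySem.Dict.empty c]
  simp [pvCnt]
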